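-- pv_equiv track=rewrite | github.com/deepson1112/MajjakoBE | utils/response_middleware.py | generate_friendly_error_message
-- ===== SOURCE A (Python) =====
-- def generate_friendly_error_message(errors):
--     """
--     Generate user-friendly error messages for all types of errors.
--     """
--     # Error mappings for general patterns
--     error_type_mapping = {
--         "required": "field cannot be empty.",
--         "null": "field cannot be null.",
--         "invalid": "field contains an invalid value.",
--         "too short": "field is too short.",
--         "too long": "field is too long.",
--     }
--
--     # Custom field-specific mappings
--     field_custom_messages = {
--         "phone_number": {
--             "required": "Phone number field cannot be empty.",
--             "null": "Phone number is required.",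
--             "invalid": "Phone number is invalid. Please enter a valid phone number.",
--         },
--         "email": {
--             "invalid": "Email address is not valid. Please provide a valid email.",
--         },
--     }
--
--     messages = []
--     for field, issues in errors.items():
--         if isinstance(issues, list):
--             for issue in issues:
--                 issue_lower = issue.lower()
--
--                 # Check for field-specific custom messages
--                 if field in field_custom_messages:
--                     for error_type, custom_message in field_custom_messages[field].items():
--                         if error_type in issue_lower:
--                             messages.append(custom_message)
--                             break
--                     else:
--                         # Fallback to generic mapping if no custom match
--                         for error_type, generic_message in error_type_mapping.items():
--                             if error_type in issue_lower:
--                                 messages.append(f"{field.replace('_', ' ').capitalize()} {generic_message}")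
--                                 break
--                         else:
--                             # Final fallback to the raw issue message
--                             messages.append(f"{field.replace('_', ' ').capitalize()}: {issue}")
--                 else:
--                     # General handling for non-custom fields
--                     for error_type, generic_message in error_type_mapping.items():
--                         if error_type in issue_lower:
--                             messages.append(f"{field.replace('_', ' ').capitalize()} {generic_message}")
--                             break
--                     else:
--                         # Final fallback to the raw issue message
--                         messages.append(f"{field.replace('_', ' ').capitalize()}: {issue}")
--
--     return " ".join(messages)
-- ===== SOURCE B (Python) =====
-- GENERIC = [
--     ("required", "field cannot be empty."),
--     ("null", "field cannot be null."),
--     ("invalid", "field contains an invalid value."),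
--     ("too short", "field is too short."),
--     ("too long", "field is too long."),
-- ]
--
-- CUSTOM = {
--     "phone_number": [
--         ("required", "Phone number field cannot be empty."),
--         ("null", "Phone number is required."),
--         ("invalid", "Phone number is invalid. Please enter a valid phone number."),
--     ],
--     "email": [
--         ("invalid", "Email address is not valid. Please provide a valid email."),
--     ],
-- }
--
--
-- def _field_messages(field, issues):
--     """Pattern-major resolution: each pattern claims the still-unresolved slots."""
--     label = field.replace('_', ' ').capitalize()
--     lows = [issue.lower() for issue in issues]
--     slots = [None] * len(issues)
--     # stage 1: field-specific patterns claim unresolved slots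
--     for pat, msg in CUSTOM.get(field, []):
--         slots = [s if s is not None else (msg if pat in low else None)
--                  for s, low in zip(slots, lows)]
--     # stage 2: generic patterns, pre-formatted with the label
--     gen_table = [(pat, f"{label} {msg}") for pat, msg in GENERIC]
--     for pat, msg in gen_table:
--         slots = [s if s is not None else (msg if pat in low else None)
--                  for s, low in zip(slots, lows)]
--     # stage 3: raw fallback for slots no pattern claimed
--     return [s if s is not None else f"{label}: {issue}"
--             for s, issue in zip(slots, issues)]
--
--
-- def generate_friendly_error_message(errors):
--     """
--     Generate user-friendly error messages for all types of errors.
--     """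
--     parts = []
--     for field, issues in errors.items():
--         if isinstance(issues, list):
--             parts += _field_messages(field, issues)
--     return " ".join(parts)
-- ===== Notes on version B (the rewrite author's own statement) =====
-- stated objective: alternative
-- what changed: A resolves each issue with a nested issue-major cascade (custom lookup, then generic lookup, then raw fallback, with the latter two duplicated in both branches); B is pattern-major: it keeps a slots array of unresolved positions per field and makes staged passes (custom patterns, then generic patterns, then one fallback pass), each pattern claiming the still-empty slots it matches.
import Mathlib
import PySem

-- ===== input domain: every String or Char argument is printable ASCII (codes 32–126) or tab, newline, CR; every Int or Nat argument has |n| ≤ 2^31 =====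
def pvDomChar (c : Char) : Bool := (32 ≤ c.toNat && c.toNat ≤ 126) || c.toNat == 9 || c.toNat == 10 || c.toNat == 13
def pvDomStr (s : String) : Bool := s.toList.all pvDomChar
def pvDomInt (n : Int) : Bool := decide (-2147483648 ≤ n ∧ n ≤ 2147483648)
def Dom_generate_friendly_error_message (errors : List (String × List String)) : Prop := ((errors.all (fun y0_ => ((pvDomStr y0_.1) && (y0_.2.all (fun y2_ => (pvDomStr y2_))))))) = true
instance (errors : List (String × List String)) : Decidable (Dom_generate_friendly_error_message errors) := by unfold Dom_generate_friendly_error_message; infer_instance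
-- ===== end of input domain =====

-- B replaces A's issue-major cascading lookup (custom/generic/raw duplicated branches) with a
-- pattern-major algorithm: staged passes over a per-field slots array (objective: alternative).


-- shared module constants (the same literal tables both Pythons carry)
def pvGeneric : List (String × String) :=
  [("required", "field cannot be empty."),
   ("null", "field cannot be null."),
   ("invalid", "field contains an invalid value."),
   ("too short", "field is too short."),
   ("too long", "field is too long.")]

def pvPhoneCustom : List (String × String) :=
  [("required", "Phone number field cannot be empty."),
   ("null", "Phone number is required."),
   ("invalid", "Phone number is invalid. Please enter a valid phone number.")]

def pvEmailCustom : List (String × String) :=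
  [("invalid", "Email address is not valid. Please provide a valid email.")]

-- field_custom_messages lookup ('field in field_custom_messages' + indexing, fused into one Option)
def pvCustomFor (field : String) : Option (List (String × String)) :=
  if field = "phone_number" then some pvPhoneCustom
  else if field = "email" then some pvEmailCustom
  else none

-- f"{field.replace('_', ' ').capitalize()}" (str.capitalize hand-ported: first char upper, rest lower; exact on ASCII)
def pvCapitalize (s : String) : String :=
  match s.toList with
  | [] => s
  | c :: cs => String.ofList (PySem.Chars.upperChar c :: PySem.Chars.lower cs)

def pvLabel (field : String) : String :=
  pvCapitalize (PySem.Str.replace field "_" " ")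

-- ===== PORT A =====
-- A's 'for error_type, m in d.items(): if error_type in issue_lower: append; break / else' loop
def pvScanA (table : List (String × String)) (il : String) : Option String :=
  match table with
  | [] => none
  | pm :: rest => if PySem.Str.isIn pm.1 il then some pm.2 else pvScanA rest il

-- the body of A's inner 'for issue in issues' loop (branches in A's order, fallback duplicated as in A)
def pvMsgA (field issue : String) : String :=
  let il := PySem.Str.lower issue
  match pvCustomFor field with
  | some cmap =>
    match pvScanA cmap il with
    | some m => m
    | none =>
      match pvScanA pvGeneric il with
      | some g => pvLabel field ++ " " ++ g
      | none => pvLabel field ++ ": " ++ issue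
  | none =>
    match pvScanA pvGeneric il with
    | some g => pvLabel field ++ " " ++ g
    | none => pvLabel field ++ ": " ++ issue

-- isinstance(issues, list) is always true under the type dict[str, list[str]]
def generate_friendly_error_message (errors : List (String × List String)) : String :=
  PySem.Str.join " "
    (errors.foldl
      (fun msgs fi => fi.2.foldl (fun msgs issue => msgs ++ [pvMsgA fi.1 issue]) msgs)
      [])

-- ===== PORT B =====
-- Source B's 'slots = [s if s is not None else (msg if pat in low else None) for s, low in zip(slots, lows)]'
def pvStepB (pat msg : String) (slots : List (Option String)) (lows : List String) : List (Option String) :=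
  (slots.zip lows).map (fun sl =>
    match sl.1 with
    | some m => some m
    | none => if PySem.Str.isIn pat sl.2 then some msg else none)

-- one staged pass: 'for pat, msg in table: slots = ...'
def pvPassB (table : List (String × String)) (slots : List (Option String)) (lows : List String) : List (Option String) :=
  table.foldl (fun slots pm => pvStepB pm.1 pm.2 slots lows) slots

-- Source B's _field_messages(field, issues): three staged passes over the slots array
def pvFieldB (field : String) (issues : List String) : List String :=
  let label := pvLabel field
  let lows := issues.map PySem.Str.lower
  let slots0 : List (Option String) := List.replicate issues.length none
  let slots1 := pvPassB ((pvCustomFor field).getD []) slots0 lows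
  let genTable := pvGeneric.map (fun pm => (pm.1, label ++ " " ++ pm.2))
  let slots2 := pvPassB genTable slots1 lows
  (slots2.zip issues).map (fun si => si.1.getD (label ++ ": " ++ si.2))

def generate_friendly_error_message_alt (errors : List (String × List String)) : String :=
  PySem.Str.join " "
    (errors.foldl (fun parts fi => parts ++ pvFieldB fi.1 fi.2) [])

-- ===== PRECONDITION & SPEC =====
def Spec_generate_friendly_error_message (errors : List (String × List String)) (out : String) : Prop := out = generate_friendly_error_message_alt errors
instance (errors : List (String × List String)) (out : String) : Decidable (Spec_generate_friendly_error_message errors out) := by unfold Spec_generate_friendly_error_message; infer_instance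

-- ===== CLAIM (what is proved, stated in full; the proofs are below) =====
def Claim_equal_generate_friendly_error_message : Prop := ∀ (errors : List (String × List String)), Dom_generate_friendly_error_message errors → Spec_generate_friendly_error_message errors (generate_friendly_error_message errors)

-- ===== LEMMAS AND PROOFS =====

-- the effect of a whole pass on a single slot
def pvFillOne (table : List (String × String)) (s : Option String) (low : String) : Option String :=
  table.foldl (fun s pm =>
    match s with
    | some m => some m
    | none => if PySem.Str.isIn pm.1 low then some pm.2 else none) s

theorem pvFillOne_some (table : List (String × String)) (m low : String) :
    pvFillOne table (some m) low = some m := by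
  induction table with
  | nil => rfl
  | cons pm rest ih => simpa [pvFillOne, List.foldl] using ih

-- a filled slot is A's first-match scan
theorem pvFillOne_none (table : List (String × String)) (low : String) :
    pvFillOne table none low = pvScanA table low := by
  induction table with
  | nil => rfl
  | cons pm rest ih =>
    simp only [pvFillOne, List.foldl, pvScanA]
    split_ifs with h
    · exact pvFillOne_some rest pm.2 low
    · exact ih

-- scanning the label-formatted generic table = formatting the scan's result
theorem pvScanA_map (table : List (String × String)) (label low : String) :
    pvScanA (table.map (fun pm => (pm.1, label ++ " " ++ pm.2))) low
      = (pvScanA table low).map (fun g => label ++ " " ++ g) := by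
  induction table with
  | nil => rfl
  | cons pm rest ih =>
    simp only [List.map, pvScanA]
    split_ifs with h
    · rfl
    · exact ih

-- a pass acts independently on each slot
theorem pvPassB_cons (table : List (String × String)) (s : Option String)
    (slots : List (Option String)) (l : String) (lows : List String) :
    pvPassB table (s :: slots) (l :: lows) = pvFillOne table s l :: pvPassB table slots lows := by
  induction table generalizing s slots with
  | nil => rfl
  | cons pm rest ih =>
    simp only [pvPassB, List.foldl, pvStepB, List.zip, List.zipWith, List.map] at *
    rw [ih]
    rfl

theorem pvPassB_nil (table : List (String × String)) (lows : List String) :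
    pvPassB table [] lows = [] := by
  induction table with
  | nil => rfl
  | cons pm rest ih => simpa [pvPassB, List.foldl, pvStepB] using ih

-- per-issue agreement: two staged fills + fallback = A's cascade
theorem pvIssue_eq (field issue : String) :
    (pvFillOne (pvGeneric.map (fun pm => (pm.1, pvLabel field ++ " " ++ pm.2)))
        (pvFillOne ((pvCustomFor field).getD []) none (PySem.Str.lower issue))
        (PySem.Str.lower issue)).getD (pvLabel field ++ ": " ++ issue)
      = pvMsgA field issue := by
  simp only [pvMsgA]
  cases hc : pvCustomFor field with
  | none =>
    simp only [Option.getD_none]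
    rw [show pvFillOne ([] : List (String × String)) none (PySem.Str.lower issue) = none from rfl]
    rw [pvFillOne_none, pvScanA_map]
    cases pvScanA pvGeneric (PySem.Str.lower issue) <;> rfl
  | some cmap =>
    simp only [Option.getD_some]
    rw [pvFillOne_none]
    cases h : pvScanA cmap (PySem.Str.lower issue) with
    | some m => rw [pvFillOne_some]; rfl
    | none =>
      rw [pvFillOne_none, pvScanA_map]
      cases pvScanA pvGeneric (PySem.Str.lower issue) <;> rfl

-- the per-field message lists agree
theorem pvField_eq (field : String) (issues : List String) :
    pvFieldB field issues = issues.map (pvMsgA field) := by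
  simp only [pvFieldB]
  induction issues with
  | nil => simp [pvPassB_nil]
  | cons issue rest ih =>
    simp only [List.length_cons, List.replicate_succ, List.map, pvPassB_cons, List.zip_cons_cons]
    rw [ih, pvIssue_eq]

-- the accumulated message lists agree
theorem pvMsgs_eq (errors : List (String × List String)) (acc : List String) :
    errors.foldl (fun msgs fi => fi.2.foldl (fun msgs issue => msgs ++ [pvMsgA fi.1 issue]) msgs) acc
      = errors.foldl (fun parts fi => parts ++ pvFieldB fi.1 fi.2) acc := by
  induction errors generalizing acc with
  | nil => rfl
  | cons fi rest ih =>
    simp only [List.foldl]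
    rw [PySem.List.foldl_append_singleton_eq_map, pvField_eq]
    exact ih _

-- ===== VERDICT (by name: the statement is the Claim_ definition above) =====
theorem generate_friendly_error_message_spec : Claim_equal_generate_friendly_error_message := by
  intro errors _
  unfold Spec_generate_friendly_error_message generate_friendly_error_message generate_friendly_error_message_alt
  rw [pvMsgs_eq]
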